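-- pv_equiv track=rewrite | github.com/Rohan-SP/Word-Unscrambler | Main.py | alpha_order
-- ===== SOURCE A (Python) =====
-- aTOz = ['a', 'b', 'c', 'd', 'e', 'f', 'g', 'h', 'i', 'j', 'k', 'l', 'm', 'n', 'o', 'p', 'q', 'r', 's', 't', 'u',
--         'v', 'w', 'x', 'y', 'z']
--
-- def alpha_order(given):
--     given = given.lower()
--     output = ""
--     for k in range(0, 26):
--         for g in range(0, len(given)):
--             if given[g] == aTOz[k]:
--                 output = output + aTOz[k]
--
--     return output
-- ===== SOURCE B (Python) =====
-- ALPHA = "abcdefghijklmnopqrstuvwxyz"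
--
-- def alpha_order(given):
--     # counting sort: one pass over the string filling 26 buckets, then emit in order
--     counts = [0] * 26
--     for ch in given.lower():
--         o = ord(ch) - 97
--         if 0 <= o < 26:
--             counts[o] += 1
--     return "".join(ALPHA[k] * counts[k] for k in range(26))
-- ===== Notes on version B (the rewrite author's own statement) =====
-- stated objective: faster
-- what changed: Replaces A's 26 passes over the string (one scan per alphabet letter, appending char by char) with a counting sort: a single pass fills a 26-bucket count array, then the output is emitted in alphabetical order.
import Mathlib
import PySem

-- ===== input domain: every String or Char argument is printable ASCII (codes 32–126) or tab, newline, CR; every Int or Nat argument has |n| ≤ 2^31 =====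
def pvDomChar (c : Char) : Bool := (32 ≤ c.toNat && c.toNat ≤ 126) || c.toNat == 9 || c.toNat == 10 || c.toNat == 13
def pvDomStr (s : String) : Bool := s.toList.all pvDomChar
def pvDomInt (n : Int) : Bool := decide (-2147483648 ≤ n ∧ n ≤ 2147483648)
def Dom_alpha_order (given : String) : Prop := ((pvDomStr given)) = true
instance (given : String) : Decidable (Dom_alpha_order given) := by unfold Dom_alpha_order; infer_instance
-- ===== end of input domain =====

-- B replaces A's 26 passes over the string (one scan per letter) by a single counting pass
-- into 26 buckets followed by an emit in alphabetical order (counting sort); same return value.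

-- ===== PORT A =====
def aTOz : List Char :=
  ['a','b','c','d','e','f','g','h','i','j','k','l','m','n','o','p','q','r','s','t','u','v','w','x','y','z']

def alpha_order (given : String) : String :=
  let g : List Char := (PySem.Str.lower given).toList
  String.mk <|
    (PySem.List.pyRange 0 26 1).foldl (fun output k =>
      (PySem.List.pyRange 0 (g.length : Int) 1).foldl (fun output i =>
        if PySem.List.pyGetD g i ' ' == PySem.List.pyGetD aTOz k ' '
        then output ++ [PySem.List.pyGetD aTOz k ' ']
        else output) output) []

-- ===== PORT B =====
def pvAlpha : List Char := "abcdefghijklmnopqrstuvwxyz".toList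

def alpha_order_alt (given : String) : String :=
  let counts : List Nat :=
    (PySem.Str.lower given).toList.foldl
      (fun cs ch =>
        let o : Int := (ch.toNat : Int) - 97
        if 0 ≤ o ∧ o < 26 then cs.set o.toNat (cs.getD o.toNat 0 + 1) else cs)
      (List.replicate 26 0)
  String.mk <|
    ((List.range 26).map (fun k => List.replicate (counts.getD k 0) (pvAlpha.getD k ' '))).flatten

-- ===== PRECONDITION & SPEC =====
def Spec_alpha_order (given : String) (out : String) : Prop := out = alpha_order_alt given
instance (given : String) (out : String) : Decidable (Spec_alpha_order given out) := by unfold Spec_alpha_order; infer_instance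

-- ===== CLAIM (what is proved, stated in full; the proofs are below) =====
def Claim_equal_alpha_order : Prop := ∀ (given : String), Dom_alpha_order given → Spec_alpha_order given (alpha_order given)

-- ===== LEMMAS AND PROOFS =====

-- B's bucket-update step, named for the proofs (definitionally equal to the lambda in the port)
def pvStep (cs : List Nat) (ch : Char) : List Nat :=
  let o : Int := (ch.toNat : Int) - 97
  if 0 ≤ o ∧ o < 26 then cs.set o.toNat (cs.getD o.toNat 0 + 1) else cs

theorem pv_alpha_eq : pvAlpha = aTOz := by decide

theorem pv_alpha_toNat : ∀ k ∈ List.range 26, (aTOz.getD k ' ').toNat = 97 + k := by decide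

-- A's inner loop appends c once per occurrence of c
theorem pv_inner (c : Char) : ∀ (L : List Char) (out : List Char),
    L.foldl (fun o x => if x == c then o ++ [c] else o) out = out ++ List.replicate (L.count c) c := by
  intro L
  induction L with
  | nil => intro out; simp
  | cons x L ih =>
    intro out
    simp only [List.foldl_cons]
    by_cases h : x = c
    · subst h
      rw [if_pos (by simp), ih, List.count_cons_self]
      simp [List.replicate_succ]
    · rw [if_neg (by simp [h]), ih]
      simp [h]

-- folding "out ++ f k" is flatten-of-map
theorem pv_foldl_append {α β : Type} (f : α → List β) :
    ∀ (l : List α) (init : List β),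
      l.foldl (fun out k => out ++ f k) init = init ++ (l.map f).flatten := by
  intro l
  induction l with
  | nil => intro init; simp
  | cons x l ih => intro init; simp [List.foldl_cons, ih]

-- B's buckets count occurrences by character code
theorem pv_counts (k : Nat) (hk : k < 26) :
    ∀ (L : List Char) (cs : List Nat), cs.length = 26 →
      (L.foldl pvStep cs).getD k 0 = cs.getD k 0 + L.countP (fun x => x.toNat == 97 + k) := by
  intro L
  induction L with
  | nil => intro cs _; simp
  | cons x L ih =>
    intro cs hcs
    rw [List.foldl_cons, List.countP_cons]
    by_cases h : (0:Int) ≤ (x.toNat : Int) - 97 ∧ (x.toNat : Int) - 97 < 26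
    · have hstep : pvStep cs x
          = cs.set ((x.toNat : Int) - 97).toNat (cs.getD ((x.toNat : Int) - 97).toNat 0 + 1) := by
        simp only [pvStep]; rw [if_pos h]
      have hlen : (cs.set ((x.toNat : Int) - 97).toNat (cs.getD ((x.toNat : Int) - 97).toNat 0 + 1)).length = 26 := by
        simpa using hcs
      rw [hstep, ih _ hlen]
      by_cases hx : x.toNat = 97 + k
      · have hik : ((x.toNat : Int) - 97).toNat = k := by omega
        rw [hik]
        have hk' : k < cs.length := by omega
        have : (cs.set k (cs.getD k 0 + 1)).getD k 0 = cs.getD k 0 + 1 := by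
          simp [List.getD_eq_getElem?_getD, List.getElem?_set_self hk']
        rw [this]
        simp [hx]
        omega
      · have hne : ((x.toNat : Int) - 97).toNat ≠ k := by omega
        have : (cs.set ((x.toNat : Int) - 97).toNat (cs.getD ((x.toNat : Int) - 97).toNat 0 + 1)).getD k 0
            = cs.getD k 0 := by
          simp [List.getD_eq_getElem?_getD, List.getElem?_set_ne hne]
        rw [this]
        simp [hx]
    · have hstep : pvStep cs x = cs := by simp only [pvStep]; rw [if_neg h]
      rw [hstep, ih _ hcs]
      have hx : ¬ x.toNat = 97 + k := by omega
      simp [hx]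

-- counting a letter by value = counting by its code
theorem pv_count_code (k : Nat) (hk : k ∈ List.range 26) (L : List Char) :
    L.count (aTOz.getD k ' ') = L.countP (fun x => x.toNat == 97 + k) := by
  have hc := pv_alpha_toNat k hk
  rw [List.count_eq_countP]
  apply List.countP_congr
  intro x _
  rw [beq_iff_eq, beq_iff_eq]
  constructor
  · intro h
    rw [h]; exact hc
  · intro h
    exact Char.ext (UInt32.toNat_inj.mp (h.trans hc.symm))

theorem pv_replicate_getD (k : Nat) (hk : k < 26) : (List.replicate 26 (0:Nat)).getD k 0 = 0 := by
  rw [List.getD_eq_getElem?_getD, List.getElem?_replicate]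
  simp [hk]

-- ===== VERDICT (by name: the statement is the Claim_ definition above) =====
theorem pv_A_char (given : String) :
    alpha_order given
      = String.mk (((List.range 26).map (fun k =>
          List.replicate (((PySem.Str.lower given).toList).count (aTOz.getD k ' ')) (aTOz.getD k ' '))).flatten) := by
  show String.mk
      ((PySem.List.pyRange 0 26 1).foldl (fun output k =>
        (PySem.List.pyRange 0 (((PySem.Str.lower given).toList).length : Int) 1).foldl (fun output i =>
          if PySem.List.pyGetD ((PySem.Str.lower given).toList) i ' ' == PySem.List.pyGetD aTOz k ' '
          then output ++ [PySem.List.pyGetD aTOz k ' ']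
          else output) output) []) = _
  refine congrArg String.mk ?_
  generalize (PySem.Str.lower given).toList = L
  have hout : (fun (output : List Char) (k : Int) =>
        (PySem.List.pyRange 0 (L.length : Int) 1).foldl (fun output i =>
          if PySem.List.pyGetD L i ' ' == PySem.List.pyGetD aTOz k ' '
          then output ++ [PySem.List.pyGetD aTOz k ' ']
          else output) output)
      = (fun (output : List Char) (k : Int) =>
          output ++ List.replicate (L.count (PySem.List.pyGetD aTOz k ' ')) (PySem.List.pyGetD aTOz k ' ')) := by
    funext out k
    rw [PySem.List.foldl_pyRange_zero_pyGetD' L ' '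
        (fun o x => if x == PySem.List.pyGetD aTOz k ' '
                    then o ++ [PySem.List.pyGetD aTOz k ' '] else o) out]
    exact pv_inner (PySem.List.pyGetD aTOz k ' ') L out
  rw [hout, pv_foldl_append, List.nil_append]
  have hR : PySem.List.pyRange 0 26 1 = (List.range 26).map Int.ofNat := by decide
  rw [hR, List.map_map]
  refine congrArg List.flatten ?_
  apply List.map_congr_left
  intro k hk
  simp [Function.comp, Int.ofNat_eq_natCast, PySem.List.pyGetD_natCast]

theorem pv_B_char (given : String) :
    alpha_order_alt given
      = String.mk (((List.range 26).map (fun k =>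
          List.replicate (((PySem.Str.lower given).toList).count (aTOz.getD k ' ')) (aTOz.getD k ' '))).flatten) := by
  show String.mk
      (((List.range 26).map (fun k =>
        List.replicate ((((PySem.Str.lower given).toList).foldl pvStep (List.replicate 26 0)).getD k 0)
          (pvAlpha.getD k ' '))).flatten) = _
  refine congrArg String.mk ?_
  generalize (PySem.Str.lower given).toList = L
  refine congrArg List.flatten ?_
  apply List.map_congr_left
  intro k hk
  have hk' : k < 26 := List.mem_range.mp hk
  rw [pv_counts k hk' L (List.replicate 26 0) (by simp),
      pv_replicate_getD k hk', Nat.zero_add, ← pv_count_code k hk L, pv_alpha_eq]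

theorem alpha_order_spec : Claim_equal_alpha_order := by
  intro given _
  unfold Spec_alpha_order
  rw [pv_A_char, pv_B_char]
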